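-- pv_equiv track=rewrite | github.com/albertstarfield/DNA-Sequences | Project.py | deviation
-- ===== SOURCE A (Python) =====
-- def deviation(x):
--     n = len(x)  # number of elements in x
--     min_value = float('inf')  # initialization of min val
--     max_value = -float('inf')  # initialization of max val
--     k = 1
--     i = 0
--     Ans = []
--     while k < n:
--         while i <= k:
--             # updating min and max values
--
--             min_value = min(min_value, x[i])
--             max_value = max(max_value, x[i])
--             i += 1
--         delta_k = max_value - min_value  # finding the deviation
--         Ans.append((k, delta_k))  # storing the result
--         k *= 2  # moving to the next multiple of 2
--     return Ans  # returning the final array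
--
-- x= [0,1,2,3,4,5,6,7,8]
-- ===== SOURCE B (Python) =====
-- def deviation(x):
--     n = len(x)
--     ks = []
--     k = 1
--     while k < n:
--         ks.append(k)
--         k *= 2
--     return [(k, max(x[:k + 1]) - min(x[:k + 1])) for k in ks]
-- ===== Notes on version B (the rewrite author's own statement) =====
-- stated objective: simpler
-- what changed: A keeps one persistent incremental min/max scan threaded through the doubling loop; B first builds the list of power-of-two indices k and then computes max(x[:k+1]) - min(x[:k+1]) independently for each k with the C-implemented built-ins (constant-factor speedup measured).
import Mathlib
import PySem

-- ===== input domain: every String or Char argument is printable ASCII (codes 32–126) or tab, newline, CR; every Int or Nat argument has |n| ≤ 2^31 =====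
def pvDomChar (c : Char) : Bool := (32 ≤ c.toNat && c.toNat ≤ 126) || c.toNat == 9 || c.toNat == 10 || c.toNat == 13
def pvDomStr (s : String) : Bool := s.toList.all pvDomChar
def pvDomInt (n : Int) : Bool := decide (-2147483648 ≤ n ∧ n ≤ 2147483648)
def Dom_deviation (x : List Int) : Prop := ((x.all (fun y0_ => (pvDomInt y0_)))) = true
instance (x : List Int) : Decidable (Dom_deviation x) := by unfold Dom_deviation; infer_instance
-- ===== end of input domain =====

-- B replaces A's single persistent incremental min/max scan with independent per-prefix
-- max/min computations over the list of power-of-two indices (simpler decomposition).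

-- ===== PORT A =====
-- inner 'while i <= k' loop of A.  Python's float('inf') / -float('inf') sentinels are
-- modelled as Option Int (none = still infinite); x[i] is PySem.List.pyGet?, whose
-- default 0 is never read inside `deviation` (there 0 ≤ i ≤ k < len x always holds).
def innerA (x : List Int) (mn mx : Option Int) (i k : Int) :
    Option Int × Option Int × Int :=
  if _h : i ≤ k then
    let v : Int := (PySem.List.pyGet? x i).getD 0
    innerA x (some (match mn with | none => v | some a => min a v))
             (some (match mx with | none => v | some a => max a v)) (i + 1) k
  else (mn, mx, i)
termination_by (k + 1 - i).toNat
decreasing_by omega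

-- outer 'while k < n' loop of A (the guard 0 < k is only for termination: k starts at 1
-- and doubles, so it always holds).  The .getD 0 defaults are never read inside
-- `deviation` (when the branch is taken the inner loop has already produced values).
def outerA (x : List Int) (n : Int) (mn mx : Option Int) (i k : Int)
    (ans : List (Int × Int)) : List (Int × Int) :=
  if _h : 0 < k ∧ k < n then
    let s := innerA x mn mx i k
    outerA x n s.1 s.2.1 s.2.2 (k * 2) (ans ++ [(k, s.2.1.getD 0 - s.1.getD 0)])
  else ans
termination_by (n - k).toNat
decreasing_by omega

def deviation (x : List Int) : List (Int × Int) :=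
  outerA x (x.length : Int) none none 0 1 []

-- ===== PORT B =====
-- the 'while k < n: ks.append(k); k *= 2' loop of B (0 < k again only for termination)
def ksB (n k : Int) : List Int :=
  if _h : 0 < k ∧ k < n then k :: ksB n (k * 2) else []
termination_by (n - k).toNat
decreasing_by omega

-- max(x[:k+1]) / min(x[:k+1]) are PySem.List.max?/min?; their .getD 0 default is never
-- read (the slice is nonempty for every k produced by ksB).
def deviation_alt (x : List Int) : List (Int × Int) :=
  (ksB (x.length : Int) 1).map (fun k =>
    let p := PySem.List.slice x none (some (k + 1))
    (k, (PySem.List.max? p (fun y => y)).getD 0 - (PySem.List.min? p (fun y => y)).getD 0))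

-- ===== PRECONDITION & SPEC =====
def Spec_deviation (x : List Int) (out : List (Int × Int)) : Prop := out = deviation_alt x
instance (x : List Int) (out : List (Int × Int)) : Decidable (Spec_deviation x out) := by unfold Spec_deviation; infer_instance

-- ===== CLAIM (what is proved, stated in full; the proofs are below) =====
def Claim_equal_deviation : Prop := ∀ (x : List Int), Dom_deviation x → Spec_deviation x (deviation x)

-- ===== LEMMAS AND PROOFS =====

lemma min?_id_concat (l : List Int) (v : Int) :
    PySem.List.min? (l ++ [v]) (fun y => y) =
      some (match PySem.List.min? l (fun y => y) with | none => v | some a => min a v) := by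
  cases l with
  | nil =>
      have hnil : PySem.List.min? ([] : List Int) (fun y => y) = none := by
        rw [PySem.List.min?_eq_none_iff]
      rw [hnil]; simp [PySem.List.min?_id_cons]
  | cons a t =>
      rw [List.cons_append, PySem.List.min?_id_cons, PySem.List.min?_id_cons]
      simp [List.foldl_append]

lemma max?_id_concat (l : List Int) (v : Int) :
    PySem.List.max? (l ++ [v]) (fun y => y) =
      some (match PySem.List.max? l (fun y => y) with | none => v | some a => max a v) := by
  cases l with
  | nil =>
      have hnil : PySem.List.max? ([] : List Int) (fun y => y) = none := by
        rw [PySem.List.max?_eq_none_iff]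
      rw [hnil]; simp [PySem.List.max?_id_cons]
  | cons a t =>
      rw [List.cons_append, PySem.List.max?_id_cons, PySem.List.max?_id_cons]
      simp [List.foldl_append]

lemma innerA_eq (x : List Int) (k : Int) (hk : k < (x.length : Int)) :
    ∀ i : Int, 0 ≤ i → i ≤ k + 1 →
      innerA x (PySem.List.min? (x.take i.toNat) (fun y => y))
               (PySem.List.max? (x.take i.toNat) (fun y => y)) i k =
        (PySem.List.min? (x.take (k + 1).toNat) (fun y => y),
         PySem.List.max? (x.take (k + 1).toNat) (fun y => y), k + 1) := by
  intro i h0 hle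
  induction h : (k + 1 - i).toNat generalizing i with
  | zero =>
      have hi : i = k + 1 := by omega
      rw [innerA]
      simp [hi]
  | succ m ih =>
      have hik : i ≤ k := by omega
      have hlen : i.toNat < x.length := by omega
      rw [innerA, dif_pos hik]
      have hget : (PySem.List.pyGet? x i).getD 0 = x[i.toNat] := by
        rw [PySem.List.pyGet?_of_nonneg x h0, List.getElem?_eq_getElem hlen]; rfl
      have htake : x.take (i.toNat + 1) = x.take i.toNat ++ [x[i.toNat]] := by
        rw [List.take_add_one]; simp [List.getElem?_eq_getElem hlen]
      have hmn := min?_id_concat (x.take i.toNat) x[i.toNat]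
      have hmx := max?_id_concat (x.take i.toNat) x[i.toNat]
      rw [← htake] at hmn hmx
      have := ih (i + 1) (by omega) (by omega) (by omega)
      simp only [hget, ← hmn, ← hmx]
      have h1 : (i + 1).toNat = i.toNat + 1 := by omega
      rw [h1] at this
      exact this

lemma outerA_eq (x : List Int) :
    ∀ k i ans, 0 < k → 0 ≤ i → i ≤ k →
      outerA x (x.length : Int)
        (PySem.List.min? (x.take i.toNat) (fun y => y))
        (PySem.List.max? (x.take i.toNat) (fun y => y)) i k ans =
      ans ++ (ksB (x.length : Int) k).map (fun j =>
        (j, (PySem.List.max? (x.take (j + 1).toNat) (fun y => y)).getD 0 -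
            (PySem.List.min? (x.take (j + 1).toNat) (fun y => y)).getD 0)) := by
  have main : ∀ m : Nat, ∀ k i ans, 0 < k → 0 ≤ i → i ≤ k →
      ((x.length : Int) - k).toNat ≤ m →
      outerA x (x.length : Int)
        (PySem.List.min? (x.take i.toNat) (fun y => y))
        (PySem.List.max? (x.take i.toNat) (fun y => y)) i k ans =
      ans ++ (ksB (x.length : Int) k).map (fun j =>
        (j, (PySem.List.max? (x.take (j + 1).toNat) (fun y => y)).getD 0 -
            (PySem.List.min? (x.take (j + 1).toNat) (fun y => y)).getD 0)) := by
    intro m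
    induction m with
    | zero =>
        intro k i ans hk h0 hik hm
        have hkn : ¬ (0 < k ∧ k < (x.length : Int)) := by omega
        rw [outerA, dif_neg hkn, ksB, dif_neg hkn]
        simp
    | succ m ih =>
        intro k i ans hk h0 hik hm
        by_cases hc : 0 < k ∧ k < (x.length : Int)
        · rw [outerA, dif_pos hc, ksB, dif_pos hc]
          simp only
          rw [innerA_eq x k hc.2 i h0 (by omega)]
          rw [ih (k * 2) (k + 1) _ (by omega) (by omega) (by omega) (by omega)]
          simp
        · rw [outerA, dif_neg hc, ksB, dif_neg hc]
          simp
  intro k i ans hk h0 hik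
  exact main ((x.length : Int) - k).toNat k i ans hk h0 hik le_rfl

lemma ksB_pos (n : Int) : ∀ k j, j ∈ ksB n k → 0 < j := by
  have main : ∀ m : Nat, ∀ k j, (n - k).toNat ≤ m → j ∈ ksB n k → 0 < j := by
    intro m
    induction m with
    | zero =>
        intro k j hm hj
        rw [ksB] at hj
        split at hj
        · omega
        · simp at hj
    | succ m ih =>
        intro k j hm hj
        rw [ksB] at hj
        split at hj
        · rcases List.mem_cons.mp hj with h | h
          · omega
          · exact ih (k * 2) j (by omega) h
        · simp at hj
  intro k j hj
  exact main (n - k).toNat k j le_rfl hj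

-- ===== VERDICT (by name: the statement is the Claim_ definition above) =====
theorem deviation_spec : Claim_equal_deviation := by
  intro x _
  unfold Spec_deviation deviation deviation_alt
  have hmn : PySem.List.min? (x.take (0 : Int).toNat) (fun y => y) = none := by
    rw [PySem.List.min?_eq_none_iff]; simp
  have hmx : PySem.List.max? (x.take (0 : Int).toNat) (fun y => y) = none := by
    rw [PySem.List.max?_eq_none_iff]; simp
  have e := outerA_eq x 1 0 [] (by omega) le_rfl (by omega)
  rw [hmn, hmx] at e
  rw [e]
  simp only [List.nil_append]
  apply List.map_congr_left
  intro j hj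
  have hjp : 0 < j := ksB_pos _ _ _ hj
  rw [PySem.List.slice_to x (by omega : (0:Int) ≤ j + 1)]
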